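-- pv_equiv track=rewrite | github.com/Gelev97/Build-keva | Computer Vision - Guess block 3D location/detect_block.py | permute_in_two
-- ===== SOURCE A (Python) =====
-- def permute_in_two(common):
--     # put all elements in group of two
--     permute_common = []
--     for line_set in common:
--         for line_set_permute in common:
--             if(line_set != line_set_permute):
--                 # get rid of same groups
--                 if((line_set_permute, line_set) not in permute_common and \
--                         (line_set, line_set_permute) not in permute_common):
--                     permute_common.append((line_set, line_set_permute))
--     return permute_common
-- ===== SOURCE B (Python) =====
-- def permute_in_two(common):
--     # dedup to first-appearance-order distinct values, then emit combinations
--     distinct = []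
--     for x in common:
--         if x not in distinct:
--             distinct.append(x)
--     pairs = []
--     while distinct:
--         x = distinct.pop(0)
--         for y in distinct:
--             pairs.append((x, y))
--     return pairs
-- ===== Notes on version B (the rewrite author's own statement) =====
-- stated objective: faster
-- what changed: Replaces A's nested scan over the whole input with repeated pair-membership checks on the growing output by a first-appearance-order dedup followed by emitting the i<j combinations of the distinct values.
import Mathlib
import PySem

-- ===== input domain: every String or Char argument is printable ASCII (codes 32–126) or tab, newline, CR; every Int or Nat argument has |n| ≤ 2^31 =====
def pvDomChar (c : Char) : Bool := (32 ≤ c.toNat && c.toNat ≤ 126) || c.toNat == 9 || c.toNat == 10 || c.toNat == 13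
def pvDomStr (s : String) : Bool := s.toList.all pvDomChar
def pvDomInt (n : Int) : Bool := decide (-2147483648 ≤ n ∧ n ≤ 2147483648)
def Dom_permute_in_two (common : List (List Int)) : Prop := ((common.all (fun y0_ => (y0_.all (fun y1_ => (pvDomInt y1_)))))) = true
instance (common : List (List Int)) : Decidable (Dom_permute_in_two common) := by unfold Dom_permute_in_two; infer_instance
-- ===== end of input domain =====

-- B is a dedup-then-combinations rewrite of A's O(n^4) repeated-membership nested scan; same return value, no mutation.
-- ===== PORT A =====
def permute_in_two (common : List (List Int)) : List (List Int × List Int) :=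
  common.foldl (fun acc line_set =>
    common.foldl (fun acc2 line_set_permute =>
      if line_set ≠ line_set_permute then
        if (line_set_permute, line_set) ∉ acc2 ∧ (line_set, line_set_permute) ∉ acc2 then
          acc2 ++ [(line_set, line_set_permute)]
        else acc2
      else acc2) acc) []

-- ===== PORT B =====
-- the `while distinct: x = distinct.pop(0); for y in distinct: pairs.append((x, y))` loop of Source B
def pvPairsLoop {α : Type} (l : List α) (pairs : List (α × α)) : List (α × α) :=
  match l with
  | [] => pairs
  | x :: rest => pvPairsLoop rest (pairs ++ rest.map (fun y => (x, y)))

def permute_in_two_alt (common : List (List Int)) : List (List Int × List Int) :=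
  let distinct := common.foldl (fun d x => if x ∈ d then d else d ++ [x]) []
  pvPairsLoop distinct []

-- ===== PRECONDITION & SPEC =====
def Spec_permute_in_two (common : List (List Int)) (out : List (List Int × List Int)) : Prop := out = permute_in_two_alt common
instance (common : List (List Int)) (out : List (List Int × List Int)) : Decidable (Spec_permute_in_two common out) := by unfold Spec_permute_in_two; infer_instance

-- ===== CLAIM (what is proved, stated in full; the proofs are below) =====
def Claim_equal_permute_in_two : Prop := ∀ (common : List (List Int)), Dom_permute_in_two common → Spec_permute_in_two common (permute_in_two common)

-- ===== LEMMAS AND PROOFS =====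

-- combinations of a list: all (l[i], l[j]) with i < j, in order
def pvComb {α : Type} : List α → List (α × α)
  | [] => []
  | x :: xs => xs.map (fun y => (x, y)) ++ pvComb xs

-- the pairs of pvComb restricted to first components among the first m elements
def pvCombTake {α : Type} : List α → Nat → List (α × α)
  | _, 0 => []
  | [], _ + 1 => []
  | x :: xs, m + 1 => xs.map (fun y => (x, y)) ++ pvCombTake xs m

-- the new distinct values of l, in first-occurrence order, relative to already-seen values s
def pvEmit {α : Type} [DecidableEq α] (s : List α) : List α → List α
  | [] => []
  | y :: ys => if y ∈ s then pvEmit s ys else y :: pvEmit (s ++ [y]) ys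

theorem pvPairsLoop_eq {α : Type} (l : List α) (acc : List (α × α)) :
    pvPairsLoop l acc = acc ++ pvComb l := by
  induction l generalizing acc with
  | nil => simp [pvPairsLoop, pvComb]
  | cons x xs ih => simp [pvPairsLoop, pvComb, ih]

theorem pvDedup_foldl (l d : List (List Int)) :
    l.foldl (fun d x => if x ∈ d then d else d ++ [x]) d = d ++ pvEmit d l := by
  induction l generalizing d with
  | nil => simp [pvEmit]
  | cons y ys ih =>
    by_cases h : y ∈ d <;> simp [pvEmit, h, List.foldl_cons, ih]

theorem pvEmit_not_mem {α : Type} [DecidableEq α] (l : List α) :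
    ∀ (s : List α) (y : α), y ∈ s → y ∉ pvEmit s l := by
  induction l with
  | nil => intro s y _; simp [pvEmit]
  | cons z zs ih =>
    intro s y hy
    by_cases hz : z ∈ s
    · simpa [pvEmit, hz] using ih s y hy
    · have hyz : y ≠ z := fun h => hz (h ▸ hy)
      have : y ∈ s ++ [z] := List.mem_append_left _ hy
      simpa [pvEmit, hz, hyz] using ih (s ++ [z]) y this

theorem pvEmit_nodup {α : Type} [DecidableEq α] (l : List α) :
    ∀ s : List α, (pvEmit s l).Nodup := by
  induction l with
  | nil => intro s; simp [pvEmit]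
  | cons z zs ih =>
    intro s
    by_cases hz : z ∈ s
    · simpa [pvEmit, hz] using ih s
    · have hznot : z ∉ pvEmit (s ++ [z]) zs :=
        pvEmit_not_mem zs (s ++ [z]) z (by simp)
      simpa [pvEmit, hz, List.nodup_cons, hznot] using ih (s ++ [z])

theorem pvEmit_mem {α : Type} [DecidableEq α] (l : List α) :
    ∀ (s : List α) (x : α), x ∈ l → x ∈ s ∨ x ∈ pvEmit s l := by
  induction l with
  | nil => intro s x h; cases h
  | cons z zs ih =>
    intro s x hx
    by_cases hz : z ∈ s
    · rcases List.mem_cons.1 hx with h | h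
      · exact Or.inl (h ▸ hz)
      · simpa [pvEmit, hz] using ih s x h
    · rcases List.mem_cons.1 hx with h | h
      · subst h; simp [pvEmit, hz]
      · rcases ih (s ++ [z]) x h with h' | h'
        · rcases List.mem_append.1 h' with h'' | h''
          · exact Or.inl h''
          · simp only [List.mem_singleton] at h''
            subst h''; simp [pvEmit, hz]
        · simp [pvEmit, hz, h']

theorem pvEmit_nil_of_subset {α : Type} [DecidableEq α] (l : List α) :
    ∀ s : List α, (∀ x ∈ l, x ∈ s) → pvEmit s l = [] := by
  induction l with
  | nil => intro s _; simp [pvEmit]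
  | cons z zs ih =>
    intro s hsub
    have hz : z ∈ s := hsub z (by simp)
    simp only [pvEmit, if_pos hz]
    exact ih s (fun x hx => hsub x (List.mem_cons_of_mem _ hx))

theorem pvEmit_filter {α : Type} [DecidableEq α] (l : List α) :
    ∀ (s t : List α), (∀ z, z ∈ s → z ∈ t) →
      pvEmit t l = (pvEmit s l).filter (fun z => decide (z ∉ t)) := by
  induction l with
  | nil => intro s t _; simp [pvEmit]
  | cons y ys ih =>
    intro s t hst
    by_cases hys : y ∈ s
    · have hyt : y ∈ t := hst y hys
      simp only [pvEmit, if_pos hys, if_pos hyt]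
      exact ih s t hst
    · by_cases hyt : y ∈ t
      · have lhs : pvEmit t (y :: ys) = pvEmit t ys := by simp [pvEmit, hyt]
        have rhs : pvEmit s (y :: ys) = y :: pvEmit (s ++ [y]) ys := by simp [pvEmit, hys]
        rw [lhs, rhs, List.filter_cons, if_neg (by simp [hyt])]
        exact ih (s ++ [y]) t (fun z hz => by
          rcases List.mem_append.1 hz with h | h
          · exact hst z h
          · simp only [List.mem_singleton] at h; exact h ▸ hyt)
      · simp only [pvEmit, if_neg hys, if_neg hyt, List.filter_cons,
          decide_eq_true_eq]
        rw [if_pos (by simpa using hyt)]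
        congr 1
        have step : pvEmit (t ++ [y]) ys
            = (pvEmit (s ++ [y]) ys).filter (fun z => decide (z ∉ t ++ [y])) :=
          ih (s ++ [y]) (t ++ [y]) (fun z hz => by
            rcases List.mem_append.1 hz with h | h
            · exact List.mem_append_left _ (hst z h)
            · exact List.mem_append_right _ h)
        rw [step]
        apply List.filter_congr
        intro z hz
        have hzy : z ≠ y := fun h =>
          pvEmit_not_mem ys (s ++ [y]) z (by simp [h]) hz
        simp [hzy]

theorem pvCombTake_full {α : Type} (d : List α) (m : Nat) (h : d.drop m = []) :
    pvCombTake d m = pvComb d := by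
  induction d generalizing m with
  | nil => cases m <;> simp [pvCombTake, pvComb]
  | cons x xs ih =>
    cases m with
    | zero => simp at h
    | succ m => simp only [List.drop_succ_cons] at h; simp [pvCombTake, pvComb, ih m h]

theorem pvCombTake_succ {α : Type} (d : List α) (m : Nat) (x : α) (t : List α)
    (h : d.drop m = x :: t) :
    pvCombTake d (m + 1) = pvCombTake d m ++ t.map (fun y => (x, y)) := by
  induction d generalizing m with
  | nil => simp at h
  | cons a xs ih =>
    cases m with
    | zero =>
      simp only [List.drop_zero] at h
      cases h
      simp [pvCombTake]
    | succ m =>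
      simp only [List.drop_succ_cons] at h
      simp [pvCombTake, ih m h, List.append_assoc]

theorem pvCombTake_mem {α : Type} (d : List α) (m : Nat) (u v : α)
    (h : (u, v) ∈ pvCombTake d m) : u ∈ d.take m ∧ v ∈ d := by
  induction d generalizing m with
  | nil => cases m <;> simp [pvCombTake] at h
  | cons x xs ih =>
    cases m with
    | zero => simp [pvCombTake] at h
    | succ m =>
      simp only [pvCombTake, List.mem_append, List.mem_map] at h
      rcases h with ⟨y, hy, heq⟩ | h
      · obtain ⟨hx, hv⟩ : x = u ∧ y = v := by
          constructor <;> [exact congrArg Prod.fst heq; exact congrArg Prod.snd heq]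
        subst hx; subst hv
        exact ⟨by simp, List.mem_cons_of_mem _ hy⟩
      · obtain ⟨h1, h2⟩ := ih m h
        exact ⟨by simp [List.take_succ_cons, List.mem_cons_of_mem _ h1],
               List.mem_cons_of_mem _ h2⟩

theorem pvCombTake_tot {α : Type} (d : List α) (m : Nat) (u v : α)
    (hu : u ∈ d.take m) (hv : v ∈ d) (hne : u ≠ v) :
    (u, v) ∈ pvCombTake d m ∨ (v, u) ∈ pvCombTake d m := by
  induction d generalizing m with
  | nil => simp at hv
  | cons x xs ih =>
    cases m with
    | zero => simp at hu
    | succ m =>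
      simp only [List.take_succ_cons, List.mem_cons] at hu
      rcases hu with rfl | hu
      · have hv' : v ∈ xs := by
          rcases List.mem_cons.1 hv with rfl | h
          · exact absurd rfl hne
          · exact h
        exact Or.inl (List.mem_append_left _ (List.mem_map.2 ⟨v, hv', rfl⟩))
      · rcases List.mem_cons.1 hv with rfl | hv'
        · have hu' : u ∈ xs := List.take_subset _ _ hu
          exact Or.inr (List.mem_append_left _ (List.mem_map.2 ⟨u, hu', rfl⟩))
        · rcases ih m hu hv' with h | h
          · exact Or.inl (List.mem_append_right _ h)
          · exact Or.inr (List.mem_append_right _ h)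

theorem pvCombTake_cross {α : Type} (d : List α) (m : Nat) (u v : α)
    (hu : u ∈ d.take m) (hv : v ∈ d) (hvn : v ∉ d.take m) :
    (u, v) ∈ pvCombTake d m := by
  induction d generalizing m with
  | nil => simp at hv
  | cons x xs ih =>
    cases m with
    | zero => simp at hu
    | succ m =>
      simp only [List.take_succ_cons, List.mem_cons] at hu hvn
      have hvx : v ≠ x := fun h => hvn (Or.inl h)
      have hvt : v ∉ List.take m xs := fun h => hvn (Or.inr h)
      have hv' : v ∈ xs := by
        rcases List.mem_cons.1 hv with rfl | h
        · exact absurd rfl hvx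
        · exact h
      rcases hu with rfl | hu
      · exact List.mem_append_left _ (List.mem_map.2 ⟨v, hv', rfl⟩)
      · exact List.mem_append_right _ (ih m hu hv' hvt)

-- A's inner-loop body as a named function (shared by the lemmas about A's loops)
def pvStep (x : List Int) (a : List (List Int × List Int)) (y : List Int) : List (List Int × List Int) :=
  if x ≠ y then
    if (y, x) ∉ a ∧ (x, y) ∉ a then a ++ [(x, y)] else a
  else a

-- inner loop of A: appends (x, ·) pairs exactly for the not-yet-seen values, in order
theorem pvInner (x : List Int) (ys : List (List Int)) :
    ∀ (seen : List (List Int)) (acc2 : List (List Int × List Int)), x ∈ seen →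
      (∀ y, y ≠ x → (((x, y) ∈ acc2 ∨ (y, x) ∈ acc2) ↔ y ∈ seen)) →
      ys.foldl (pvStep x) acc2 = acc2 ++ (pvEmit seen ys).map (fun y => (x, y)) := by
  induction ys with
  | nil => intro seen acc2 _ _; simp [pvEmit]
  | cons y ys ih =>
    intro seen acc2 hx hchar
    rw [List.foldl_cons]
    by_cases hyx : y = x
    · subst hyx
      have hstep : pvStep y acc2 y = acc2 := by simp [pvStep]
      have hskip : pvEmit seen (y :: ys) = pvEmit seen ys := by simp [pvEmit, hx]
      rw [hstep, hskip]
      exact ih seen acc2 hx hchar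
    · have hxy : x ≠ y := fun h => hyx h.symm
      by_cases hys : y ∈ seen
      · have hpair : (x, y) ∈ acc2 ∨ (y, x) ∈ acc2 := (hchar y hyx).2 hys
        have hcond : ¬ ((y, x) ∉ acc2 ∧ (x, y) ∉ acc2) := by tauto
        have hstep : pvStep x acc2 y = acc2 := by
          simp only [pvStep, if_pos hxy, if_neg hcond]
        have hskip : pvEmit seen (y :: ys) = pvEmit seen ys := by simp [pvEmit, hys]
        rw [hstep, hskip]
        exact ih seen acc2 hx hchar
      · have hnp : ¬ ((x, y) ∈ acc2 ∨ (y, x) ∈ acc2) :=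
          fun h => hys ((hchar y hyx).1 h)
        have hcond : (y, x) ∉ acc2 ∧ (x, y) ∉ acc2 :=
          ⟨fun h => hnp (Or.inr h), fun h => hnp (Or.inl h)⟩
        have hstep : pvStep x acc2 y = acc2 ++ [(x, y)] := by
          simp only [pvStep, if_pos hxy, if_pos hcond]
        have hemitc : pvEmit seen (y :: ys) = y :: pvEmit (seen ++ [y]) ys := by
          simp [pvEmit, hys]
        have hx' : x ∈ seen ++ [y] := List.mem_append_left _ hx
        have hchar' : ∀ z, z ≠ x →
            (((x, z) ∈ acc2 ++ [(x, y)] ∨ (z, x) ∈ acc2 ++ [(x, y)]) ↔ z ∈ seen ++ [y]) := by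
          intro z hz
          constructor
          · intro h
            rcases h with h | h
            · rcases List.mem_append.1 h with h' | h'
              · exact List.mem_append_left _ ((hchar z hz).1 (Or.inl h'))
              · simp only [List.mem_singleton, Prod.mk.injEq] at h'
                exact List.mem_append_right _ (by simp [h'.2])
            · rcases List.mem_append.1 h with h' | h'
              · exact List.mem_append_left _ ((hchar z hz).1 (Or.inr h'))
              · simp only [List.mem_singleton, Prod.mk.injEq] at h'
                exact absurd h'.1 hz
          · intro h
            rcases List.mem_append.1 h with h' | h'
            · rcases (hchar z hz).2 h' with h'' | h''
              · exact Or.inl (List.mem_append_left _ h'')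
              · exact Or.inr (List.mem_append_left _ h'')
            · simp only [List.mem_singleton] at h'
              exact Or.inl (List.mem_append_right _ (by simp [h']))
        rw [hstep, ih (seen ++ [y]) (acc2 ++ [(x, y)]) hx' hchar', hemitc]
        simp [List.append_assoc]

-- filtering out an initial segment of a duplicate-free list leaves the rest
theorem pvFilter_drop {α : Type} [DecidableEq α] (d : List α) (k : Nat) (hd : d.Nodup) :
    d.filter (fun z => decide (z ∉ d.take k)) = d.drop k := by
  have key : ∀ t u : List α, t.Disjoint u →
      (t ++ u).filter (fun z => decide (z ∉ t)) = u := by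
    intro t u hdisj
    rw [List.filter_append]
    have h1 : t.filter (fun z => decide (z ∉ t)) = [] := by
      simp only [List.filter_eq_nil_iff]
      intro a ha
      simp [ha]
    have h2 : u.filter (fun z => decide (z ∉ t)) = u := by
      rw [List.filter_eq_self]
      intro a ha
      simp only [decide_eq_true_eq]
      exact fun hat => hdisj hat ha
    rw [h1, h2, List.nil_append]
  have := key (d.take k) (d.drop k) (List.disjoint_take_drop hd (le_refl k))
  rwa [List.take_append_drop] at this

-- running pvEmit again past an initial segment of the distinct list yields the rest
theorem pvEmit_take_drop {α : Type} [DecidableEq α] (l : List α) (k : Nat) :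
    pvEmit ((pvEmit [] l).take k) l = (pvEmit [] l).drop k := by
  rw [pvEmit_filter l [] ((pvEmit [] l).take k) (by simp)]
  exact pvFilter_drop (pvEmit [] l) k (pvEmit_nodup l [])

theorem pvTake_succ_of_drop {α : Type} (d : List α) (m : Nat) (x : α) (t : List α)
    (h : d.drop m = x :: t) : d.take (m + 1) = d.take m ++ [x] := by
  induction d generalizing m with
  | nil => simp at h
  | cons a xs ih =>
    cases m with
    | zero => simp only [List.drop_zero] at h; cases h; simp
    | succ m =>
      simp only [List.drop_succ_cons] at h
      simp [List.take_succ_cons, ih m h]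

-- outer loop of A: invariant acc = pvCombTake d m, remaining new values = d.drop m
theorem pvOuter (common : List (List Int)) (d : List (List Int))
    (hd : d = pvEmit [] common) :
    ∀ (rest : List (List Int)) (m : Nat),
      pvEmit (d.take m) rest = d.drop m →
      rest.foldl (fun acc x => common.foldl (pvStep x) acc) (pvCombTake d m) = pvComb d := by
  have hnodup : d.Nodup := hd ▸ pvEmit_nodup common []
  have hsub : ∀ x ∈ common, x ∈ d := by
    intro x hx
    rcases pvEmit_mem common [] x hx with h | h
    · simp at h
    · exact hd ▸ h
  intro rest
  induction rest with
  | nil =>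
    intro m hrest
    simp only [pvEmit] at hrest
    simp [List.foldl_nil, pvCombTake_full d m hrest.symm]
  | cons x rest ih =>
    intro m hrest
    rw [List.foldl_cons]
    by_cases hxt : x ∈ d.take m
    · -- x was handled already: inner loop adds nothing
      have hchar : ∀ y, y ≠ x →
          (((x, y) ∈ pvCombTake d m ∨ (y, x) ∈ pvCombTake d m) ↔ y ∈ d) := by
        intro y hy
        constructor
        · intro h
          rcases h with h | h
          · exact (pvCombTake_mem d m x y h).2
          · exact List.take_subset _ _ (pvCombTake_mem d m y x h).1
        · intro hyd
          exact pvCombTake_tot d m x y hxt hyd (fun h => hy h.symm)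
      have hinner := pvInner x common d (pvCombTake d m) (List.take_subset _ _ hxt) hchar
      have hemit : pvEmit d common = [] := pvEmit_nil_of_subset common d hsub
      rw [hinner, hemit]
      simp only [List.map_nil, List.append_nil]
      apply ih m
      simpa [pvEmit, hxt] using hrest
    · -- x is the next new distinct value: d.drop m = x :: t
      simp only [pvEmit, if_neg hxt] at hrest
      obtain ⟨t, hdrop, hemt⟩ : ∃ t, d.drop m = x :: t ∧ pvEmit (d.take m ++ [x]) rest = t :=
        ⟨pvEmit (d.take m ++ [x]) rest, hrest.symm, rfl⟩
      have hxd : x ∈ d := by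
        have hx' : x ∈ d.drop m := by rw [hdrop]; simp
        exact List.mem_of_mem_drop hx'
      have htake1 : d.take (m + 1) = d.take m ++ [x] := pvTake_succ_of_drop d m x t hdrop
      have hchar : ∀ y, y ≠ x →
          (((x, y) ∈ pvCombTake d m ∨ (y, x) ∈ pvCombTake d m) ↔ y ∈ d.take m ++ [x]) := by
        intro y hy
        constructor
        · intro h
          rcases h with h | h
          · exact absurd (pvCombTake_mem d m x y h).1 hxt
          · exact List.mem_append_left _ (pvCombTake_mem d m y x h).1
        · intro hys
          rcases List.mem_append.1 hys with h | h
          · exact Or.inr (pvCombTake_cross d m y x h hxd hxt)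
          · simp only [List.mem_singleton] at h
            exact absurd h hy
      have hinner := pvInner x common (d.take m ++ [x]) (pvCombTake d m)
        (List.mem_append_right _ (by simp)) hchar
      rw [hinner]
      have hdrop1 : d.drop (m + 1) = t := by
        have h1 := congrArg (List.drop 1) hdrop
        simpa [List.drop_drop, Nat.add_comm] using h1
      have hgen := pvEmit_take_drop common (m + 1)
      rw [← hd] at hgen
      have hemit_eq : pvEmit (d.take m ++ [x]) common = t := by
        rw [← htake1, hgen, hdrop1]
      rw [hemit_eq, ← pvCombTake_succ d m x t hdrop]
      apply ih (m + 1)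
      rw [htake1, hemt, hdrop1]

-- ===== VERDICT (by name: the statement is the Claim_ definition above) =====
theorem permute_in_two_spec : Claim_equal_permute_in_two := by
  intro common _
  unfold Spec_permute_in_two
  have hA : permute_in_two common
      = common.foldl (fun acc x => common.foldl (pvStep x) acc) [] := rfl
  have hB : permute_in_two_alt common
      = pvPairsLoop (common.foldl (fun d x => if x ∈ d then d else d ++ [x]) []) [] := rfl
  rw [hA, hB, pvDedup_foldl common [], List.nil_append, pvPairsLoop_eq, List.nil_append]
  have h0 : pvEmit ((pvEmit [] common).take 0) common = (pvEmit [] common).drop 0 := by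
    simp
  have hmain := pvOuter common (pvEmit [] common) rfl common 0 h0
  simpa [pvCombTake] using hmain
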